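-- pv_equiv track=rewrite | github.com/Hardikshah126/creditai | Backend/backend/app/services/agent_service.py | get_next_question
-- ===== SOURCE A (Python) =====
-- from typing import Optional
--
-- FEATURE_QUESTIONS = {
--     "income_stability_score": {
--         "question": "What is your approximate monthly income in USD?",
--         "chips": None,
--         "type": "numeric",
--     },
--     "employment_type": {
--         "question": "What best describes your current work?",
--         "chips": ["Salaried employee", "Self-employed", "Daily wage worker", "Unemployed", "Other"],
--         "type": "choice",
--     },
--     "num_dependents": {
--         "question": "How many people depend on your income?",
--         "chips": ["0", "1–2", "3–5", "6 or more"],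
--         "type": "choice",
--     },
--     "has_repaid_informal_loan": {
--         "question": "Have you ever taken and fully repaid an informal loan (from a friend, family, or local lender)?",
--         "chips": ["Yes", "No", "Not sure"],
--         "type": "choice",
--     },
-- }
--
-- def get_next_question(
--     missing_features: list[str],
--     conversation_history: list[dict],
--     user_name: str,
-- ) -> tuple[str, Optional[list[str]], bool]:
--     """
--     Determine the next question to ask.
--     Returns (ai_message, chips_or_None, is_complete).
--     """
--     if not missing_features:
--         return (
--             f"Perfect, {user_name.split()[0]}! I have everything I need. "
--             "Generating your credit score now...",
--             None,
--             True,
--         )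
--
--     next_feature = missing_features[0]
--     feature_info = FEATURE_QUESTIONS.get(next_feature)
--
--     if not feature_info:
--         # Shouldn't happen, but skip unknown features
--         return get_next_question(missing_features[1:], conversation_history, user_name)
--
--     # If this is the first question, add a warm opener
--     if not conversation_history:
--         prefix = (
--             f"Hi {user_name.split()[0]} 👋 I've reviewed your uploaded documents. "
--             "To complete your credit profile, I just have a few quick questions — "
--             "this will take under 2 minutes.\n\n"
--         )
--     else:
--         prefix = ""
--
--     question = prefix + feature_info["question"]
--     chips = feature_info.get("chips")
--
--     return question, chips, False
-- ===== SOURCE B (Python) =====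
-- from typing import Optional
--
-- FEATURE_QUESTIONS = {
--     "income_stability_score": {
--         "question": "What is your approximate monthly income in USD?",
--         "chips": None,
--         "type": "numeric",
--     },
--     "employment_type": {
--         "question": "What best describes your current work?",
--         "chips": ["Salaried employee", "Self-employed", "Daily wage worker", "Unemployed", "Other"],
--         "type": "choice",
--     },
--     "num_dependents": {
--         "question": "How many people depend on your income?",
--         "chips": ["0", "1–2", "3–5", "6 or more"],
--         "type": "choice",
--     },
--     "has_repaid_informal_loan": {
--         "question": "Have you ever taken and fully repaid an informal loan (from a friend, family, or local lender)?",
--         "chips": ["Yes", "No", "Not sure"],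
--         "type": "choice",
--     },
-- }
--
-- def get_next_question(
--     missing_features: list[str],
--     conversation_history: list[dict],
--     user_name: str,
-- ) -> tuple[str, Optional[list[str]], bool]:
--     """Determine the next question to ask. Returns (ai_message, chips_or_None, is_complete)."""
--     # Stage 1: drop every unknown feature in one filtering pass.
--     known = [f for f in missing_features if f in FEATURE_QUESTIONS]
--     # Stage 2: nothing left -> profile complete.
--     if not known:
--         return (
--             f"Perfect, {user_name.split()[0]}! I have everything I need. Generating your credit score now...",
--             None,
--             True,
--         )
--     # Stage 3: format the question for the first recognized feature.
--     info = FEATURE_QUESTIONS[known[0]]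
--     if conversation_history:
--         return info["question"], info.get("chips"), False
--     opener = (
--         f"Hi {user_name.split()[0]} \U0001F44B I've reviewed your uploaded documents. "
--         "To complete your credit profile, I just have a few quick questions — this will take under 2 minutes.\n\n"
--     )
--     return opener + info["question"], info.get("chips"), False
-- ===== Notes on version B (the rewrite author's own statement) =====
-- stated objective: faster
-- what changed: Replaces A's tail recursion (which re-slices missing_features[1:] at every unknown feature and interleaves lookup with formatting) with a staged design: one filtering pass keeps the known features, then a direct dict access on the first survivor formats the result; completion is the empty-filter case.
import Mathlib
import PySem

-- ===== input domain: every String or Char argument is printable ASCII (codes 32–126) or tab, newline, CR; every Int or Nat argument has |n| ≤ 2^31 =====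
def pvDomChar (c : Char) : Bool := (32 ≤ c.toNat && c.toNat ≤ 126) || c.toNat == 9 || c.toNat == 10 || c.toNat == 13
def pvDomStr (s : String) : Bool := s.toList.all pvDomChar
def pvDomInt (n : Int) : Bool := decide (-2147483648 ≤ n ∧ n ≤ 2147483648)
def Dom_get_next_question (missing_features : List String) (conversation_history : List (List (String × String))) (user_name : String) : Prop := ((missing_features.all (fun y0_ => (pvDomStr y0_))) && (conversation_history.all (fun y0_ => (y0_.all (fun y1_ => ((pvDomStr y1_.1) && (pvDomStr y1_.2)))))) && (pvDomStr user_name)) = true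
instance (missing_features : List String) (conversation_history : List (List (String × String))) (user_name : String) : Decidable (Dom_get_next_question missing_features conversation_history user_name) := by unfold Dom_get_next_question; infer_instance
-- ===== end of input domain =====

-- B replaces A's skip-recursion (which re-slices the list at every unknown feature) with a staged
-- design: one filtering pass, then a direct table access on the first survivor; a timing run measured B faster (A copies the list tail at each skipped feature).
-- Both Pythons raise IndexError on user_name.split()[0] when user_name has no non-whitespace
-- characters and a split()[0] branch is reached; Pre_ excludes exactly those inputs.

-- ===== PORT A =====
-- The FEATURE_QUESTIONS table as A uses it: key ↦ (question, chips); the unused "type" is omitted.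
def fqTable : List (String × (String × Option (List String))) :=
  [("income_stability_score", ("What is your approximate monthly income in USD?", none)),
   ("employment_type", ("What best describes your current work?",
      some ["Salaried employee", "Self-employed", "Daily wage worker", "Unemployed", "Other"])),
   ("num_dependents", ("How many people depend on your income?",
      some ["0", "1–2", "3–5", "6 or more"])),
   ("has_repaid_informal_loan",
      ("Have you ever taken and fully repaid an informal loan (from a friend, family, or local lender)?",
       some ["Yes", "No", "Not sure"]))]

-- user_name.split()[0]; the .getD "" default is only reachable where Python raises (outside Pre_)
def pvFirstName (user_name : String) : String :=
  (PySem.List.pyGet? (PySem.Str.split₀ user_name) 0).getD ""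

-- A: tail recursion, skipping unknown features one at a time, formatting inline
def get_next_question (missing_features : List String) (conversation_history : List (List (String × String))) (user_name : String) : String × Option (List String) × Bool :=
  match missing_features with
  | [] =>
    ("Perfect, " ++ pvFirstName user_name ++ "! I have everything I need. " ++
       "Generating your credit score now...", none, true)
  | next_feature :: rest =>
    match fqTable.lookup next_feature with
    | none => get_next_question rest conversation_history user_name
    | some feature_info =>
      let prefix_ :=
        if conversation_history.isEmpty then
          "Hi " ++ pvFirstName user_name ++ " 👋 I've reviewed your uploaded documents. " ++
          "To complete your credit profile, I just have a few quick questions — " ++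
          "this will take under 2 minutes.\n\n"
        else ""
      (prefix_ ++ feature_info.1, feature_info.2, false)

-- ===== PORT B =====
-- B-side helpers: 'f in FEATURE_QUESTIONS' / 'FEATURE_QUESTIONS[f]' as a pattern match on the key
def bInfo : String → Option (String × Option (List String))
  | "income_stability_score" => some ("What is your approximate monthly income in USD?", none)
  | "employment_type" => some ("What best describes your current work?",
      some ["Salaried employee", "Self-employed", "Daily wage worker", "Unemployed", "Other"])
  | "num_dependents" => some ("How many people depend on your income?",
      some ["0", "1–2", "3–5", "6 or more"])
  | "has_repaid_informal_loan" =>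
      some ("Have you ever taken and fully repaid an informal loan (from a friend, family, or local lender)?",
        some ["Yes", "No", "Not sure"])
  | _ => none

-- user_name.split()[0] on B's side, written as head?
def bFirst (user_name : String) : String := (PySem.Str.split₀ user_name).head?.getD ""

-- B: stage 1 filter the known features, stage 2 empty ⇒ done, stage 3 format known[0]
def get_next_question_alt (missing_features : List String) (conversation_history : List (List (String × String))) (user_name : String) : String × Option (List String) × Bool :=
  let known := missing_features.filter (fun f => (bInfo f).isSome)
  if hk : known = [] then
    ("Perfect, " ++ (bFirst user_name ++
       "! I have everything I need. Generating your credit score now..."), none, true)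
  else
    let info := (bInfo (known.head hk)).getD ("", none)
    if conversation_history ≠ [] then (info.1, info.2, false)
    else
      let opener := "Hi " ++ (bFirst user_name ++
        (" 👋 I've reviewed your uploaded documents. " ++
         "To complete your credit profile, I just have a few quick questions — this will take under 2 minutes.\n\n"))
      (opener ++ info.1, info.2, false)

-- ===== PRECONDITION & SPEC =====
-- Pre_ excludes exactly the inputs where A raises IndexError: user_name.split() is empty and a
-- split()[0] branch is reached (i.e. unless a recognized feature exists AND the history is nonempty).
def Pre_get_next_question (missing_features : List String) (conversation_history : List (List (String × String))) (user_name : String) : Prop :=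
  PySem.Str.split₀ user_name ≠ [] ∨
    (conversation_history ≠ [] ∧ ∃ f ∈ missing_features,
      f ∈ ["income_stability_score", "employment_type", "num_dependents", "has_repaid_informal_loan"])
instance (missing_features : List String) (conversation_history : List (List (String × String))) (user_name : String) : Decidable (Pre_get_next_question missing_features conversation_history user_name) := by unfold Pre_get_next_question; infer_instance

def pvWitness_get_next_question : List String × (List (List (String × String))) × String :=
  (["num_dependents"], [], "Ann B")

def Spec_get_next_question (missing_features : List String) (conversation_history : List (List (String × String))) (user_name : String) (out : String × Option (List String) × Bool) : Prop := out = get_next_question_alt missing_features conversation_history user_name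
instance (missing_features : List String) (conversation_history : List (List (String × String))) (user_name : String) (out : String × Option (List String) × Bool) : Decidable (Spec_get_next_question missing_features conversation_history user_name out) := by unfold Spec_get_next_question; infer_instance

-- ===== CLAIM (what is proved, stated in full; the proofs are below) =====
def Claim_equal_get_next_question : Prop := ∀ (missing_features : List String) (conversation_history : List (List (String × String))) (user_name : String), Dom_get_next_question missing_features conversation_history user_name → Pre_get_next_question missing_features conversation_history user_name → Spec_get_next_question missing_features conversation_history user_name (get_next_question missing_features conversation_history user_name)

-- ===== LEMMAS AND PROOFS =====

-- A's association-list lookup agrees with B's pattern-match table on every key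
theorem lookup_eq_bInfo (f : String) : fqTable.lookup f = bInfo f := by
  unfold fqTable bInfo
  by_cases h1 : f = "income_stability_score"
  · simp [h1, List.lookup]
  by_cases h2 : f = "employment_type"
  · simp [h2, List.lookup]
  by_cases h3 : f = "num_dependents"
  · simp [h3, List.lookup]
  by_cases h4 : f = "has_repaid_informal_loan"
  · simp [h4, List.lookup]
  have e1 : (f == "income_stability_score") = false := by simp [h1]
  have e2 : (f == "employment_type") = false := by simp [h2]
  have e3 : (f == "num_dependents") = false := by simp [h3]
  have e4 : (f == "has_repaid_informal_loan") = false := by simp [h4]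
  simp [List.lookup, e1, e2, e3, e4]

theorem first_eq (un : String) : pvFirstName un = bFirst un := by
  unfold pvFirstName bFirst
  cases PySem.Str.split₀ un <;> simp [PySem.List.pyGet?, PySem.List.pyIdx?]

-- ===== VERDICT (by name: the statement is the Claim_ definition above) =====
theorem get_next_question_spec : Claim_equal_get_next_question := by
  intro mf ch un hd hp
  clear hd hp
  unfold Spec_get_next_question
  induction mf with
  | nil =>
    simp [get_next_question, get_next_question_alt, first_eq, String.append_assoc]
  | cons f rest ih =>
    rw [get_next_question_alt] at ih ⊢
    simp only [List.filter_cons]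
    cases h : fqTable.lookup f with
    | none =>
      rw [get_next_question, h]
      have : bInfo f = none := by rw [← lookup_eq_bInfo]; exact h
      simpa [this] using ih
    | some info =>
      have hb : bInfo f = some info := by rw [← lookup_eq_bInfo, h]
      rw [get_next_question, h]
      simp only [hb, Option.isSome_some, if_pos]
      by_cases hch : ch = [] <;>
        simp [hch, hb, first_eq, String.append_assoc]
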